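-- pv_equiv track=rewrite | github.com/tomer-mil/Extended_Intro_to_CS | HW_6/hw6.py | CYK_d
-- ===== SOURCE A (Python) =====
-- def CYK_d(st, rule_dict, start_var):
--
--     ''' What is the minimal depth of a parse tree that generates st? '''
--     n = len(st)
--
--     # table for the dynamic programming algorithm
--     table = [[None for j in range(n + 1)] for i in range(n)]
--     # Initialize the relevant triangular region with empty sets
--     for i in range(n):
--         for j in range(i + 1, n + 1):
--             table[i][j] = {}
--
--     # Fill the table cells representing substrings of length 1
--     fill_length_1_cells_d(table, rule_dict, st)
--
--     # Fill the table cells representing substrings of length >=2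
--     for length in range(2, n + 1):
--         for i in range(0, n - length + 1):
--             j = i + length
--             fill_cell_d(table, i, j, rule_dict)
--
--     # Original CYK: return start_var in table[0][n]
--     if start_var in table[0][n]:
--         return table[0][n][start_var]
--     return -1
--
-- def fill_length_1_cells_d(table, rule_dict, st):
--     n = len(st)
--     for i in range(n):
--         for lhs in rule_dict:  # lhs is a single variable
--             if st[i] in rule_dict[lhs]:
--                 table[i][i + 1][lhs] = 1
--
-- def fill_cell_d(table, i, j, rule_dict):
--
--     for k in range(i + 1, j):  # non trivial partitions of s[i:j]
--         for lhs in rule_dict:  # lhs is a single variable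
--             for rhs in rule_dict[lhs]:
--                 if len(rhs) == 2:  # rule like A -> XY (not like A -> a)
--                     X, Y = rhs[0], rhs[1]
--                     if X in table[i][k] and Y in table[k][j]:
--                         max_value = max(table[i][k][X], table[k][j][Y])
--                         if lhs in table[i][j]:
--                             table[i][j][lhs] = min(table[i][j][lhs], max_value + 1)
--                         else:
--                             table[i][j][lhs] = max_value + 1
-- ===== SOURCE B (Python) =====
-- def CYK_d(st, rule_dict, start_var):
--     ''' Minimal parse-tree depth, by top-down memoized recursion over (i, j, var). '''
--     n = len(st)
--     memo = {}
--
--     def depth(i, j, v):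
--         key = (i, j, v)
--         if key in memo:
--             return memo[key]
--         if j - i == 1:
--             best = 1 if st[i] in rule_dict.get(v, []) else None
--         else:
--             best = None
--             for rhs in rule_dict.get(v, []):
--                 if len(rhs) == 2:
--                     for k in range(i + 1, j):
--                         l = depth(i, k, rhs[0])
--                         r = depth(k, j, rhs[1])
--                         if l is not None and r is not None:
--                             cand = max(l, r) + 1
--                             if best is None or cand < best:
--                                 best = cand
--         memo[key] = best
--         return best
--
--     d = depth(0, n, start_var)
--     return -1 if d is None else d
-- ===== Notes on version B (the rewrite author's own statement) =====
-- stated objective: faster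
-- what changed: Replaced the bottom-up CYK table (nested loops mutating per-cell dicts over all lengths/splits/rules) by a top-down memoized recursion depth(i,j,var) that computes only the (substring, variable) subproblems reachable from start_var, instead of always filling the full n^2 table for every variable.
import Mathlib
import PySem

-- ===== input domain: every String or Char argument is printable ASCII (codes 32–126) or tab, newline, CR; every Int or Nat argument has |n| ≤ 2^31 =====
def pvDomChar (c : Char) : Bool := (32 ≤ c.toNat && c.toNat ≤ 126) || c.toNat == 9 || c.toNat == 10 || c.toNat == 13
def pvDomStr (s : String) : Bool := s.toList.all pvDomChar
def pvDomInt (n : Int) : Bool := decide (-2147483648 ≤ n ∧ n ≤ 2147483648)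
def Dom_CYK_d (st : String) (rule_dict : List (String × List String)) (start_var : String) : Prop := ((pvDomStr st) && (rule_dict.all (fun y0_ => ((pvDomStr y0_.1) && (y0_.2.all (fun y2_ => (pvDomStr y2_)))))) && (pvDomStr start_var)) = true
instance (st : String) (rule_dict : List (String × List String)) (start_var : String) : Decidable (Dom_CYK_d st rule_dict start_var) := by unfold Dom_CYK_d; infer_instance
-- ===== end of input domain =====

-- B replaces A's bottom-up CYK table by a top-down memoized recursion on (i, j, var) that
-- only evaluates subproblems reachable from start_var (measured faster in a timing run);
-- equivalence of the RETURN values is proved on nonempty strings (on "" Python A raises IndexError).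

-- ===== PORT A =====
-- st[i] as a 1-character Python string
def sOf (c : Char) : String := String.ofList [c]

-- range(a, b) for the Nat bounds used here (exact: all loop bounds below are ≥ 0)
def rangeNat (a b : Nat) : List Nat := List.range' a (b - a)

-- table[i][j] read / write (the table is a list of rows; 'None' cells of A are modelled as
-- empty dicts: A never reads nor writes them inside the claimed domain)
def tget (t : List (List (PySem.Dict String Int))) (i j : Nat) : PySem.Dict String Int :=
  (t.getD i []).getD j PySem.Dict.empty

def tset (t : List (List (PySem.Dict String Int))) (i j : Nat) (d : PySem.Dict String Int) :
    List (List (PySem.Dict String Int)) :=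
  t.set i ((t.getD i []).set j d)

-- fill_length_1_cells_d
def fillLen1 (t : List (List (PySem.Dict String Int))) (rd : PySem.Dict String (List String))
    (cs : List Char) : List (List (PySem.Dict String Int)) :=
  (rangeNat 0 cs.length).foldl (fun t i =>
    rd.keys.foldl (fun t lhs =>
      if (rd.getD lhs []).contains (sOf (cs.getD i ' ')) then
        tset t i (i+1) ((tget t i (i+1)).insert lhs 1)
      else t) t) t

-- fill_cell_d
def fillCell (t : List (List (PySem.Dict String Int))) (i j : Nat)
    (rd : PySem.Dict String (List String)) : List (List (PySem.Dict String Int)) :=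
  (rangeNat (i+1) j).foldl (fun t k =>
    rd.keys.foldl (fun t lhs =>
      (rd.getD lhs []).foldl (fun t rhs =>
        if PySem.Str.len rhs = 2 then
          let X := sOf (rhs.toList.getD 0 ' ')
          let Y := sOf (rhs.toList.getD 1 ' ')
          if (tget t i k).contains X && (tget t k j).contains Y then
            let maxValue := max ((tget t i k).getD X 0) ((tget t k j).getD Y 0)
            if (tget t i j).contains lhs then
              tset t i j ((tget t i j).insert lhs (min ((tget t i j).getD lhs 0) (maxValue + 1)))
            else
              tset t i j ((tget t i j).insert lhs (maxValue + 1))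
          else t
        else t) t) t) t

def CYK_d (st : String) (rule_dict : List (String × List String)) (start_var : String) : Int :=
  let cs := st.toList
  let n := cs.length
  let rd : PySem.Dict String (List String) := PySem.Dict.ofList rule_dict
  let table := List.replicate n (List.replicate (n+1) PySem.Dict.empty)
  let table := fillLen1 table rd cs
  let table := (rangeNat 2 (n+1)).foldl (fun t length =>
      (rangeNat 0 (n - length + 1)).foldl (fun t i => fillCell t i (i + length) rd) t) table
  match (tget table 0 n).get? start_var with
  | some d => d
  | none => -1

-- ===== PORT B =====
-- depth(i, j, v): minimal depth of a parse of st[i:j] from v, memoized; returns (value, memo).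
-- fuel only makes the recursion structural (spans shrink; fuel = n+1 at the top never runs out).
def bdepth (cs : List Char) (rd : PySem.Dict String (List String)) :
    Nat → Nat → Nat → String → PySem.Dict (Nat × Nat × String) (Option Int) →
    (Option Int) × PySem.Dict (Nat × Nat × String) (Option Int)
  | 0, _, _, _, memo => (none, memo)
  | fuel+1, i, j, v, memo =>
    match memo.get? (i, j, v) with
    | some o => (o, memo)
    | none =>
      let res :=
        if j - i = 1 then
          ((if (rd.getD v []).contains (sOf (cs.getD i ' ')) then some 1 else none), memo)
        else
          (rd.getD v []).foldl (fun acc rhs =>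
            if PySem.Str.len rhs = 2 then
              (rangeNat (i+1) j).foldl (fun acc k =>
                let p1 := bdepth cs rd fuel i k (sOf (rhs.toList.getD 0 ' ')) acc.2
                let p2 := bdepth cs rd fuel k j (sOf (rhs.toList.getD 1 ' ')) p1.2
                match p1.1, p2.1 with
                | some lv, some rv =>
                  ((match acc.1 with
                   | none => some (max lv rv + 1)
                   | some b => if max lv rv + 1 < b then some (max lv rv + 1) else some b), p2.2)
                | _, _ => (acc.1, p2.2)) acc
            else acc) (none, memo)
      (res.1, res.2.insert (i, j, v) res.1)

def CYK_d_alt (st : String) (rule_dict : List (String × List String)) (start_var : String) : Int :=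
  let cs := st.toList
  let n := cs.length
  let rd : PySem.Dict String (List String) := PySem.Dict.ofList rule_dict
  match (bdepth cs rd (n+1) 0 n start_var PySem.Dict.empty).1 with
  | some d => d
  | none => -1

-- ===== PRECONDITION & SPEC =====
-- Pre_ excludes exactly the empty string, on which Python A raises IndexError (table[0][n] on an empty table).
def Pre_CYK_d (st : String) (rule_dict : List (String × List String)) (start_var : String) : Prop :=
  st ≠ ""
instance (st : String) (rule_dict : List (String × List String)) (start_var : String) : Decidable (Pre_CYK_d st rule_dict start_var) := by unfold Pre_CYK_d; infer_instance

def pvWitness_CYK_d : String × (List (String × List String)) × String :=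
  ("ab", [("S", ["AB"]), ("A", ["a"]), ("B", ["b"])], "S")

def Spec_CYK_d (st : String) (rule_dict : List (String × List String)) (start_var : String) (out : Int) : Prop := out = CYK_d_alt st rule_dict start_var
instance (st : String) (rule_dict : List (String × List String)) (start_var : String) (out : Int) : Decidable (Spec_CYK_d st rule_dict start_var out) := by unfold Spec_CYK_d; infer_instance

-- ===== CLAIM (what is proved, stated in full; the proofs are below) =====
def Claim_equal_CYK_d : Prop := ∀ (st : String) (rule_dict : List (String × List String)) (start_var : String), Dom_CYK_d st rule_dict start_var → Pre_CYK_d st rule_dict start_var → Spec_CYK_d st rule_dict start_var (CYK_d st rule_dict start_var)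

-- ===== LEMMAS AND PROOFS =====

-- invariant propagation along a foldl over range' a len
theorem foldl_range'_inv {σ : Type} (f : σ → Nat → σ) (Q : Nat → σ → Prop) (a len : Nat) (s : σ)
    (h0 : Q a s) (hstep : ∀ m u, a ≤ m → m < a + len → Q m u → Q (m+1) (f u m)) :
    Q (a + len) (List.foldl f s (List.range' a len)) := by
  induction len generalizing a s with
  | zero => simpa using h0
  | succ len ih =>
    rw [List.range'_succ]
    rw [List.foldl_cons]
    have := ih (a+1) (f s a) (hstep a s le_rfl (by omega) h0)
      (fun m u hm hm' hq => hstep m u (by omega) (by omega) hq)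
    have heq : a + (len+1) = (a+1) + len := by omega
    rw [heq]; exact this

-- min?-fold on Option Int
def mstep (acc : Option Int) (c : Int) : Option Int :=
  some (match acc with | none => c | some m => min m c)

def mfold (a : Option Int) (l : List Int) : Option Int := l.foldl mstep a

theorem mfold_some (m : Int) (l : List Int) : mfold (some m) l = some (l.foldl min m) := by
  induction l generalizing m with
  | nil => rfl
  | cons c l ih => exact ih (min m c)

theorem mfold_none_eq_min? (l : List Int) : mfold none l = l.min? := by
  cases l with
  | nil => rfl
  | cons c l => simpa [mfold, List.foldl, mstep, List.min?] using mfold_some c l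

theorem mfold_append (a : Option Int) (l₁ l₂ : List Int) :
    mfold a (l₁ ++ l₂) = mfold (mfold a l₁) l₂ := by
  simp [mfold, List.foldl_append]

theorem min?_perm {l l' : List Int} (h : l.Perm l') : l.min? = l'.min? := by
  cases hl : l.min? with
  | none =>
    rw [List.min?_eq_none_iff] at hl; subst hl
    rw [← List.Perm.nil_eq h]; rfl
  | some a =>
    cases hl' : l'.min? with
    | none =>
      rw [List.min?_eq_none_iff] at hl'; subst hl'
      have := List.Perm.eq_nil h; subst this; simp at hl
    | some b =>
      rw [List.min?_eq_some_iff] at hl hl'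
      exact congrArg some (le_antisymm (hl.2 b (h.symm.mem_iff.mp hl'.1))
        (hl'.2 a (h.mem_iff.mp hl.1)))

theorem flatMap_flatMap_perm {α β γ : Type} (l₁ : List α) (l₂ : List β) (g : α → β → List γ) :
    (l₁.flatMap fun a => l₂.flatMap fun b => g a b).Perm
      (l₂.flatMap fun b => l₁.flatMap fun a => g a b) := by
  induction l₁ with
  | nil => simp
  | cons a l₁ ih =>
    simp only [List.flatMap_cons]
    exact (List.Perm.append_left _ ih).trans
      (List.flatMap_append_perm l₂ (fun b => g a b) (fun b => l₁.flatMap fun a => g a b))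

-- ---- the common pure specification P ----

def cand2 (o₁ o₂ : Option Int) : List Int :=
  match o₁, o₂ with
  | some a, some b => [max a b + 1]
  | _, _ => []

def candB (rd : PySem.Dict String (List String)) (Q : Nat → Nat → String → Option Int)
    (L i : Nat) (v : String) : List Int :=
  (rd.getD v []).flatMap (fun rhs =>
    if PySem.Str.len rhs = 2 then
      (rangeNat (i+1) (i+L)).flatMap (fun k =>
        cand2 (Q (k-i) i (sOf (rhs.toList.getD 0 ' '))) (Q (L-(k-i)) k (sOf (rhs.toList.getD 1 ' '))))
    else [])

def pureP (rd : PySem.Dict String (List String)) (cs : List Char) :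
    Nat → Nat → Nat → String → Option Int
  | 0, _, _, _ => none
  | fuel+1, L, i, v =>
    if L = 1 then (if (rd.getD v []).contains (sOf (cs.getD i ' ')) then some 1 else none)
    else mfold none (candB rd (pureP rd cs fuel) L i v)

def P (rd : PySem.Dict String (List String)) (cs : List Char) (L i : Nat) (v : String) :
    Option Int := pureP rd cs L L i v

theorem candB_zero (rd : PySem.Dict String (List String)) (Q) (i : Nat) (v : String) :
    candB rd Q 0 i v = [] := by
  simp [candB, rangeNat]

theorem candB_congr {rd : PySem.Dict String (List String)} {Q Q'} {L i : Nat} {v : String}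
    (h : ∀ L' i' v', 1 ≤ L' → L' < L → Q L' i' v' = Q' L' i' v') :
    candB rd Q L i v = candB rd Q' L i v := by
  unfold candB
  refine List.flatMap_congr ?_
  intro rhs _
  split
  · refine List.flatMap_congr ?_
    intro k hk
    have hk' := List.mem_range'.mp hk
    have h1 : 1 ≤ k - i := by omega
    have h2 : k - i < L := by omega
    rw [h _ _ _ h1 h2, h _ _ _ (by omega) (by omega)]
  · rfl

theorem pureP_zero_L (rd : PySem.Dict String (List String)) (cs : List Char) (f i : Nat) (v : String) :
    pureP rd cs f 0 i v = none := by
  cases f with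
  | zero => rfl
  | succ f => simp [pureP, candB_zero, mfold]

theorem pureP_mono (rd : PySem.Dict String (List String)) (cs : List Char) :
    ∀ fuel fuel' L i v, L ≤ fuel → L ≤ fuel' →
    pureP rd cs fuel L i v = pureP rd cs fuel' L i v := by
  intro fuel
  induction fuel with
  | zero =>
    intro fuel' L i v h1 _
    have : L = 0 := by omega
    subst this
    rw [pureP_zero_L, pureP_zero_L]
  | succ fuel ih =>
    intro fuel' L i v h1 h2
    cases fuel' with
    | zero =>
      have : L = 0 := by omega
      subst this
      rw [pureP_zero_L, pureP_zero_L]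
    | succ fuel' =>
      by_cases hL : L = 1
      · simp [pureP, hL]
      · simp only [pureP, if_neg hL]
        congr 1
        exact candB_congr (fun L' i' v' hx h' => ih fuel' L' i' v' (by omega) (by omega))

theorem P_zero (rd : PySem.Dict String (List String)) (cs : List Char) (i : Nat) (v : String) :
    P rd cs 0 i v = none := rfl

theorem P_ne_one (rd : PySem.Dict String (List String)) (cs : List Char) {L : Nat} (i : Nat)
    (v : String) (h : L ≠ 1) :
    P rd cs L i v = mfold none (candB rd (fun L' i' v' => P rd cs L' i' v') L i v) := by
  cases L with
  | zero => rw [P_zero, candB_zero]; rfl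
  | succ M =>
    show pureP rd cs (M+1) (M+1) i v = _
    simp only [pureP, if_neg h]
    congr 1
    exact candB_congr (fun L' i' v' h1 h2 => pureP_mono rd cs M L' L' i' v' (by omega) le_rfl)

-- ---- B-side: the memoized recursion computes P ----

def BInv (rd : PySem.Dict String (List String)) (cs : List Char)
    (memo : PySem.Dict (Nat × Nat × String) (Option Int)) : Prop :=
  ∀ i j v o, memo.get? (i, j, v) = some o → o = P rd cs (j - i) i v

theorem BInv_insert {rd : PySem.Dict String (List String)} {cs : List Char}
    {memo : PySem.Dict (Nat × Nat × String) (Option Int)} (h : BInv rd cs memo)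
    {i j : Nat} {v : String} {o : Option Int} (ho : o = P rd cs (j - i) i v) :
    BInv rd cs (memo.insert (i, j, v) o) := by
  intro i' j' v' o' h'
  rw [PySem.Dict.get?_insert] at h'
  split at h'
  · rename_i heq
    obtain ⟨h1, h2, h3⟩ : i' = i ∧ j' = j ∧ v' = v := by simpa [Prod.ext_iff] using heq
    subst h1; subst h2; subst h3
    cases h'; exact ho
  · exact h i' j' v' o' h'

-- the two loop bodies of bdepth, named for the proofs (definitionally equal to the inline lambdas)
def bstep (cs : List Char) (rd : PySem.Dict String (List String)) (fuel i j : Nat) (rhs : String)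
    (acc : Option Int × PySem.Dict (Nat × Nat × String) (Option Int)) (k : Nat) :
    Option Int × PySem.Dict (Nat × Nat × String) (Option Int) :=
  let p1 := bdepth cs rd fuel i k (sOf (rhs.toList.getD 0 ' ')) acc.2
  let p2 := bdepth cs rd fuel k j (sOf (rhs.toList.getD 1 ' ')) p1.2
  match p1.1, p2.1 with
  | some lv, some rv =>
    ((match acc.1 with
     | none => some (max lv rv + 1)
     | some b => if max lv rv + 1 < b then some (max lv rv + 1) else some b), p2.2)
  | _, _ => (acc.1, p2.2)

def brstep (cs : List Char) (rd : PySem.Dict String (List String)) (fuel i j : Nat)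
    (acc : Option Int × PySem.Dict (Nat × Nat × String) (Option Int)) (rhs : String) :
    Option Int × PySem.Dict (Nat × Nat × String) (Option Int) :=
  if PySem.Str.len rhs = 2 then (rangeNat (i+1) j).foldl (bstep cs rd fuel i j rhs) acc else acc

theorem bdepth_succ (cs : List Char) (rd : PySem.Dict String (List String)) (fuel i j : Nat)
    (v : String) (memo : PySem.Dict (Nat × Nat × String) (Option Int)) :
    bdepth cs rd (fuel+1) i j v memo =
      match memo.get? (i, j, v) with
      | some o => (o, memo)
      | none =>
        let res :=
          if j - i = 1 then
            ((if (rd.getD v []).contains (sOf (cs.getD i ' ')) then some 1 else none), memo)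
          else (rd.getD v []).foldl (brstep cs rd fuel i j) (none, memo)
        (res.1, res.2.insert (i, j, v) res.1) := rfl

theorem P_one (rd : PySem.Dict String (List String)) (cs : List Char) (i : Nat) (v : String) :
    P rd cs 1 i v
      = (if (rd.getD v []).contains (sOf (cs.getD i ' ')) = true then some 1 else none) := rfl

theorem bdepth_spec (rd : PySem.Dict String (List String)) (cs : List Char) :
    ∀ (fuel i j : Nat) (v : String) (memo : PySem.Dict (Nat × Nat × String) (Option Int)),
    BInv rd cs memo → j - i ≤ fuel →
    (bdepth cs rd fuel i j v memo).1 = P rd cs (j - i) i v ∧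
      BInv rd cs (bdepth cs rd fuel i j v memo).2 := by
  intro fuel
  induction fuel with
  | zero =>
    intro i j v memo hInv hle
    have h0 : j - i = 0 := by omega
    rw [h0]
    exact ⟨rfl, hInv⟩
  | succ fuel ih =>
    intro i j v memo hInv hle
    rw [bdepth_succ]
    cases hget : memo.get? (i, j, v) with
    | some o => exact ⟨hInv i j v o hget, hInv⟩
    | none =>
      by_cases hij : j - i = 1
      · simp only [if_pos hij]
        refine ⟨?_, ?_⟩
        · show (if (rd.getD v []).contains (sOf (cs.getD i ' ')) = true then some 1 else none)
            = P rd cs (j - i) i v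
          rw [hij, P_one]
        · exact BInv_insert hInv
            (show (if (rd.getD v []).contains (sOf (cs.getD i ' ')) = true then some 1 else none)
              = P rd cs (j - i) i v by rw [hij, P_one])
      · simp only [if_neg hij]
        have inner : ∀ (rhs : String) (kl : List Nat)
            (acc : Option Int × PySem.Dict (Nat × Nat × String) (Option Int)),
            (∀ k ∈ kl, i + 1 ≤ k ∧ k < j) → BInv rd cs acc.2 →
            (kl.foldl (bstep cs rd fuel i j rhs) acc).1
              = mfold acc.1 (kl.flatMap fun k =>
                  cand2 (P rd cs (k - i) i (sOf (rhs.toList.getD 0 ' ')))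
                        (P rd cs (j - k) k (sOf (rhs.toList.getD 1 ' ')))) ∧
              BInv rd cs (kl.foldl (bstep cs rd fuel i j rhs) acc).2 := by
          intro rhs kl
          induction kl with
          | nil => intro acc _ hacc; exact ⟨rfl, hacc⟩
          | cons k kl ihk =>
            intro acc hkb hacc
            have hkb0 := hkb k (by simp)
            have h1 := ih i k (sOf (rhs.toList.getD 0 ' ')) acc.2 hacc (by omega)
            have h2 := ih k j (sOf (rhs.toList.getD 1 ' '))
              (bdepth cs rd fuel i k (sOf (rhs.toList.getD 0 ' ')) acc.2).2 h1.2 (by omega)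
            have hkb' : ∀ k' ∈ kl, i + 1 ≤ k' ∧ k' < j := fun k' hk' => hkb k' (by simp [hk'])
            simp only [List.foldl_cons, List.flatMap_cons]
            rw [mfold_append]
            have hstep : bstep cs rd fuel i j rhs acc k
                = (mfold acc.1 (cand2 (P rd cs (k - i) i (sOf (rhs.toList.getD 0 ' ')))
                                      (P rd cs (j - k) k (sOf (rhs.toList.getD 1 ' ')))),
                   (bdepth cs rd fuel k j (sOf (rhs.toList.getD 1 ' '))
                     (bdepth cs rd fuel i k (sOf (rhs.toList.getD 0 ' ')) acc.2).2).2) := by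
              unfold bstep
              rw [← h1.1, ← h2.1]
              rcases hl : (bdepth cs rd fuel i k (sOf (rhs.toList.getD 0 ' ')) acc.2).1 with _ | lv
                <;> rcases hr : (bdepth cs rd fuel k j (sOf (rhs.toList.getD 1 ' '))
                      (bdepth cs rd fuel i k (sOf (rhs.toList.getD 0 ' ')) acc.2).2).1 with _ | rv
                <;> simp only [hl, hr, cand2]
              · rfl
              · rfl
              · rfl
              · show (_, _) = (_, _)
                congr 1
                rcases acc.1 with _ | b
                · rfl
                · simp only [mfold, List.foldl, mstep]
                  by_cases hb : max lv rv + 1 < b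
                  · rw [if_pos hb, min_eq_right (by omega)]
                  · rw [if_neg hb, min_eq_left (by omega)]
            rw [hstep]
            exact ihk _ hkb' h2.2
        have outer : ∀ (rhss : List String)
            (acc : Option Int × PySem.Dict (Nat × Nat × String) (Option Int)),
            BInv rd cs acc.2 →
            (rhss.foldl (brstep cs rd fuel i j) acc).1
              = mfold acc.1 (rhss.flatMap fun rhs =>
                  if PySem.Str.len rhs = 2 then
                    (rangeNat (i+1) j).flatMap (fun k =>
                      cand2 (P rd cs (k - i) i (sOf (rhs.toList.getD 0 ' ')))
                            (P rd cs (j - k) k (sOf (rhs.toList.getD 1 ' '))))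
                  else []) ∧
              BInv rd cs (rhss.foldl (brstep cs rd fuel i j) acc).2 := by
          intro rhss
          induction rhss with
          | nil => intro acc hacc; exact ⟨rfl, hacc⟩
          | cons rhs rhss ihr =>
            intro acc hacc
            simp only [List.foldl_cons, List.flatMap_cons]
            rw [mfold_append]
            by_cases h2 : PySem.Str.len rhs = 2
            · have hbnd : ∀ k ∈ rangeNat (i+1) j, i + 1 ≤ k ∧ k < j := by
                intro k hk
                unfold rangeNat at hk
                have := List.mem_range'_1.mp hk
                omega
              have hbr : brstep cs rd fuel i j acc rhs
                  = (rangeNat (i+1) j).foldl (bstep cs rd fuel i j rhs) acc := by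
                unfold brstep; rw [if_pos h2]
              rw [hbr]
              have hin := inner rhs (rangeNat (i+1) j) acc hbnd hacc
              obtain ⟨hv, hm⟩ := ihr _ hin.2
              refine ⟨?_, hm⟩
              rw [hv, hin.1, if_pos h2]
            · have hbr : brstep cs rd fuel i j acc rhs = acc := by unfold brstep; rw [if_neg h2]
              rw [hbr, if_neg h2]
              exact ihr acc hacc
        obtain ⟨hbest, hminv⟩ := outer (rd.getD v []) (none, memo) hInv
        have hval : ((rd.getD v []).foldl (brstep cs rd fuel i j) (none, memo)).1
            = P rd cs (j - i) i v := by
          rw [hbest]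
          by_cases hle0 : j ≤ i
          · have h0 : j - i = 0 := by omega
            have hr0 : rangeNat (i+1) j = [] := by
              unfold rangeNat
              have : j - (i+1) = 0 := by omega
              rw [this, List.range'_zero]
            rw [h0]
            simp only [hr0, List.flatMap_nil, ite_self, P_zero, mfold]
            have he : List.flatMap (fun (rhs : String) => ([] : List Int)) (rd.getD v []) = [] := by
              simp
            rw [he]
            rfl
          · have hij' : i < j := by omega
            rw [P_ne_one rd cs i v hij]
            congr 1
            unfold candB
            refine List.flatMap_congr ?_
            intro rhs _
            by_cases h2 : PySem.Str.len rhs = 2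
            · rw [if_pos h2, if_pos h2]
              have hj : i + (j - i) = j := by omega
              rw [hj]
              refine List.flatMap_congr ?_
              intro k hk
              unfold rangeNat at hk
              have hkb := List.mem_range'_1.mp hk
              have : j - i - (k - i) = j - k := by omega
              rw [this]
            · rw [if_neg h2, if_neg h2]
        refine ⟨hval, ?_⟩
        show BInv rd cs ((((rd.getD v []).foldl (brstep cs rd fuel i j) (none, memo)).2).insert
          (i, j, v) (((rd.getD v []).foldl (brstep cs rd fuel i j) (none, memo)).1))
        exact BInv_insert hminv hval

theorem alt_eq (st : String) (rule_dict : List (String × List String)) (start_var : String) :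
    CYK_d_alt st rule_dict start_var =
      (match P (PySem.Dict.ofList rule_dict) st.toList st.toList.length 0 start_var with
       | some d => d
       | none => -1) := by
  show (match (bdepth st.toList (PySem.Dict.ofList rule_dict) (st.toList.length + 1) 0
      st.toList.length start_var PySem.Dict.empty).1 with
    | some d => d
    | none => -1)
    = (match P (PySem.Dict.ofList rule_dict) st.toList st.toList.length 0 start_var with
       | some d => d
       | none => -1)
  have hInv : BInv (PySem.Dict.ofList rule_dict) st.toList PySem.Dict.empty := by
    intro i j v o h
    rw [PySem.Dict.get?_empty] at h
    cases h
  have h := (bdepth_spec (PySem.Dict.ofList rule_dict) st.toList (st.toList.length + 1) 0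
    st.toList.length start_var PySem.Dict.empty hInv (by omega)).1
  rw [Nat.sub_zero] at h
  rw [h]

theorem getD_set_self' {α : Type} (l : List α) (i : Nat) (a dflt : α) (h : i < l.length) :
    (l.set i a).getD i dflt = a := by
  rw [List.getD_eq_getElem?_getD, List.getElem?_set_self h]; rfl

theorem getD_set_ne' {α : Type} (l : List α) {i j : Nat} (a : α) (dflt : α) (h : i ≠ j) :
    (l.set i a).getD j dflt = l.getD j dflt := by
  rw [List.getD_eq_getElem?_getD, List.getElem?_set_ne h, ← List.getD_eq_getElem?_getD]

theorem set_getD_self' {α : Type} (l : List α) (i : Nat) (dflt : α) (h : i < l.length) :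
    l.set i (l.getD i dflt) = l := by
  have : l.getD i dflt = l[i] := by
    rw [List.getD_eq_getElem?_getD, List.getElem?_eq_getElem h]; rfl
  rw [this]
  exact List.set_getElem_self h

-- ---- A-side: the table ----

def Shape (t : List (List (PySem.Dict String Int))) (n : Nat) : Prop :=
  t.length = n ∧ ∀ i, i < n → (t.getD i []).length = n + 1

theorem shape_tbl0 (n : Nat) :
    Shape (List.replicate n (List.replicate (n+1) PySem.Dict.empty)) n := by
  constructor
  · simp
  · intro i hi
    simp [List.getD_eq_getElem?_getD, hi]

theorem tget_tbl0 (n i j : Nat) :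
    tget (List.replicate n (List.replicate (n+1) PySem.Dict.empty)) i j = PySem.Dict.empty := by
  unfold tget
  by_cases hi : i < n
  · by_cases hj : j < n + 1
    · simp [List.getD_eq_getElem?_getD, hi, hj]
    · simp [List.getD_eq_getElem?_getD, hi, hj]
  · simp [List.getD_eq_getElem?_getD, hi]

theorem shape_tset {t : List (List (PySem.Dict String Int))} {n : Nat} (hsh : Shape t n)
    (i j : Nat) (d : PySem.Dict String Int) : Shape (tset t i j d) n := by
  obtain ⟨hlen, hrow⟩ := hsh
  refine ⟨by simpa [tset] using hlen, ?_⟩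
  intro i' hi'
  unfold tset
  by_cases hii : i' = i
  · subst hii
    rw [List.getD_eq_getElem?_getD, List.getElem?_set_self (by omega)]
    simp only [Option.getD_some, List.length_set]
    exact hrow i' hi'
  · rw [List.getD_eq_getElem?_getD, List.getElem?_set_ne (by omega)]
    rw [← List.getD_eq_getElem?_getD]
    exact hrow i' hi'

theorem tget_tset_self {t : List (List (PySem.Dict String Int))} {n : Nat} (hsh : Shape t n)
    {i j : Nat} (hi : i < n) (hj : j < n + 1) (d : PySem.Dict String Int) :
    tget (tset t i j d) i j = d := by
  obtain ⟨hlen, hrow⟩ := hsh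
  unfold tget tset
  rw [getD_set_self' _ _ _ _ (by omega)]
  rw [getD_set_self' _ _ _ _ (by rw [hrow i hi]; omega)]

theorem tget_tset_ne {t : List (List (PySem.Dict String Int))} {i j i' j' : Nat}
    (h : i' ≠ i ∨ j' ≠ j) (d : PySem.Dict String Int) :
    tget (tset t i j d) i' j' = tget t i' j' := by
  unfold tget tset
  by_cases hii : i' = i
  · subst hii
    have hjj : j' ≠ j := by tauto
    by_cases hlen : i' < t.length
    · rw [getD_set_self' _ _ _ _ (by omega)]
      rw [getD_set_ne' _ _ _ (by omega)]
    · rw [List.set_eq_of_length_le (by omega)]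
  · rw [getD_set_ne' _ _ _ (by omega)]

theorem tset_tset (t : List (List (PySem.Dict String Int))) (i j : Nat)
    (d d' : PySem.Dict String Int) : tset (tset t i j d) i j d' = tset t i j d' := by
  unfold tset
  by_cases hlen : i < t.length
  · rw [getD_set_self' _ _ _ _ (by omega), List.set_set, List.set_set]
  · have h1 : t.set i ((t.getD i []).set j d) = t := List.set_eq_of_length_le (by omega)
    rw [h1]

theorem tset_tget_self {t : List (List (PySem.Dict String Int))} {n : Nat} (hsh : Shape t n)
    {i j : Nat} (hi : i < n) (hj : j < n + 1) :
    tset t i j (tget t i j) = t := by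
  obtain ⟨hlen, hrow⟩ := hsh
  unfold tget tset
  rw [set_getD_self' _ _ _ (by rw [hrow i hi]; omega)]
  exact set_getD_self' _ _ _ (by omega)

theorem foldl_tset {α : Type} (t : List (List (PySem.Dict String Int))) (i j : Nat)
    (g : List (List (PySem.Dict String Int)) → α → List (List (PySem.Dict String Int)))
    (h : PySem.Dict String Int → α → PySem.Dict String Int) (l : List α)
    (H : ∀ d x, x ∈ l → g (tset t i j d) x = tset t i j (h d x)) :
    ∀ d, l.foldl g (tset t i j d) = tset t i j (l.foldl h d) := by
  induction l with
  | nil => intro d; rfl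
  | cons x l ih =>
    intro d
    rw [List.foldl_cons, List.foldl_cons, H d x (by simp)]
    exact ih (fun d' x' hx' => H d' x' (by simp [hx'])) _

-- the dict-level version of fill_cell_d's innermost update (reads other cells of the FIXED table t)
def cstep (t : List (List (PySem.Dict String Int))) (i j k : Nat) (lhs : String)
    (d : PySem.Dict String Int) (rhs : String) : PySem.Dict String Int :=
  if PySem.Str.len rhs = 2 then
    let X := sOf (rhs.toList.getD 0 ' ')
    let Y := sOf (rhs.toList.getD 1 ' ')
    if (tget t i k).contains X && (tget t k j).contains Y then
      let maxValue := max ((tget t i k).getD X 0) ((tget t k j).getD Y 0)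
      if d.contains lhs then d.insert lhs (min (d.getD lhs 0) (maxValue + 1))
      else d.insert lhs (maxValue + 1)
    else d
  else d

def cellVal (t : List (List (PySem.Dict String Int))) (i j : Nat)
    (rd : PySem.Dict String (List String)) : PySem.Dict String Int :=
  (rangeNat (i+1) j).foldl (fun d k =>
    rd.keys.foldl (fun d lhs =>
      (rd.getD lhs []).foldl (cstep t i j k lhs) d) d) (tget t i j)

theorem fillCell_eq {t : List (List (PySem.Dict String Int))} {n : Nat} (hsh : Shape t n)
    {i j : Nat} (rd : PySem.Dict String (List String)) (hi : i < n) (hj : j ≤ n) :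
    fillCell t i j rd = tset t i j (cellVal t i j rd) := by
  unfold fillCell cellVal
  have H3 : ∀ (k : Nat), i + 1 ≤ k → k < j → ∀ (lhs : String)
      (d : PySem.Dict String Int) (rhs : String),
      (fun t rhs =>
        if PySem.Str.len rhs = 2 then
          let X := sOf (rhs.toList.getD 0 ' ')
          let Y := sOf (rhs.toList.getD 1 ' ')
          if (tget t i k).contains X && (tget t k j).contains Y then
            let maxValue := max ((tget t i k).getD X 0) ((tget t k j).getD Y 0)
            if (tget t i j).contains lhs then
              tset t i j ((tget t i j).insert lhs (min ((tget t i j).getD lhs 0) (maxValue + 1)))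
            else
              tset t i j ((tget t i j).insert lhs (maxValue + 1))
          else t
        else t) (tset t i j d) rhs = tset t i j (cstep t i j k lhs d rhs) := by
    intro k hk1 hk2 lhs d rhs
    simp only []
    unfold cstep
    rw [tget_tset_ne (Or.inr (by omega)) d, tget_tset_ne (Or.inl (by omega)) d,
      tget_tset_self hsh hi (by omega) d, tset_tset]
    by_cases h2 : PySem.Str.len rhs = 2
    · rw [if_pos h2, if_pos h2]
      simp only []
      by_cases hc : (tget t i k).contains (sOf (rhs.toList.getD 0 ' '))
          && (tget t k j).contains (sOf (rhs.toList.getD 1 ' '))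
      · rw [if_pos hc, if_pos hc]
        by_cases hl : d.contains lhs
        · rw [if_pos hl, if_pos hl]
        · rw [if_neg hl, if_neg hl]; exact tset_tset t i j d _
      · rw [if_neg hc, if_neg hc]
    · rw [if_neg h2, if_neg h2]
  have key := foldl_tset t i j
    (fun t k =>
      rd.keys.foldl (fun t lhs =>
        (rd.getD lhs []).foldl (fun t rhs =>
          if PySem.Str.len rhs = 2 then
            let X := sOf (rhs.toList.getD 0 ' ')
            let Y := sOf (rhs.toList.getD 1 ' ')
            if (tget t i k).contains X && (tget t k j).contains Y then
              let maxValue := max ((tget t i k).getD X 0) ((tget t k j).getD Y 0)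
              if (tget t i j).contains lhs then
                tset t i j ((tget t i j).insert lhs (min ((tget t i j).getD lhs 0) (maxValue + 1)))
              else
                tset t i j ((tget t i j).insert lhs (maxValue + 1))
            else t
          else t) t) t)
    (fun d k => rd.keys.foldl (fun d lhs => (rd.getD lhs []).foldl (cstep t i j k lhs) d) d)
    (rangeNat (i+1) j)
    (by
      intro d k hk
      have hkb : i + 1 ≤ k ∧ k < j := by
        unfold rangeNat at hk
        have := List.mem_range'_1.mp hk
        omega
      simp only []
      exact foldl_tset t i j
        (fun t lhs =>
          (rd.getD lhs []).foldl (fun t rhs =>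
            if PySem.Str.len rhs = 2 then
              let X := sOf (rhs.toList.getD 0 ' ')
              let Y := sOf (rhs.toList.getD 1 ' ')
              if (tget t i k).contains X && (tget t k j).contains Y then
                let maxValue := max ((tget t i k).getD X 0) ((tget t k j).getD Y 0)
                if (tget t i j).contains lhs then
                  tset t i j ((tget t i j).insert lhs (min ((tget t i j).getD lhs 0) (maxValue + 1)))
                else
                  tset t i j ((tget t i j).insert lhs (maxValue + 1))
              else t
            else t) t)
        (fun d lhs => (rd.getD lhs []).foldl (cstep t i j k lhs) d) rd.keys
        (by
          intro d lhs _
          simp only []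
          exact foldl_tset t i j
            (fun t rhs =>
              if PySem.Str.len rhs = 2 then
                let X := sOf (rhs.toList.getD 0 ' ')
                let Y := sOf (rhs.toList.getD 1 ' ')
                if (tget t i k).contains X && (tget t k j).contains Y then
                  let maxValue := max ((tget t i k).getD X 0) ((tget t k j).getD Y 0)
                  if (tget t i j).contains lhs then
                    tset t i j ((tget t i j).insert lhs (min ((tget t i j).getD lhs 0) (maxValue + 1)))
                  else
                    tset t i j ((tget t i j).insert lhs (maxValue + 1))
                else t
              else t)
            (cstep t i j k lhs) (rd.getD lhs [])
            (fun d' rhs _ => H3 k hkb.1 hkb.2 lhs d' rhs) d) d)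
    (tget t i j)
  rw [tset_tget_self hsh hi (by omega)] at key
  exact key

def candR (rd : PySem.Dict String (List String)) (cs : List Char) (i j k : Nat)
    (rhss : List String) : List Int :=
  rhss.flatMap (fun rhs =>
    if PySem.Str.len rhs = 2 then
      cand2 (P rd cs (k - i) i (sOf (rhs.toList.getD 0 ' ')))
            (P rd cs (j - k) k (sOf (rhs.toList.getD 1 ' ')))
    else [])

theorem cstep_fold_get? (rd : PySem.Dict String (List String)) (cs : List Char)
    (t : List (List (PySem.Dict String Int))) (i j k : Nat) (lhs v : String)
    (hL : ∀ X, (tget t i k).get? X = P rd cs (k - i) i X)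
    (hR : ∀ Y, (tget t k j).get? Y = P rd cs (j - k) k Y) :
    ∀ (rhss : List String) (d : PySem.Dict String Int),
    (rhss.foldl (cstep t i j k lhs) d).get? v
      = if v = lhs then mfold (d.get? v) (candR rd cs i j k rhss) else d.get? v := by
  intro rhss
  induction rhss with
  | nil =>
    intro d
    simp only [List.foldl_nil, candR, List.flatMap_nil]
    split <;> rfl
  | cons rhs rhss ihr =>
    intro d
    rw [List.foldl_cons]
    have hflat : candR rd cs i j k (rhs :: rhss)
        = (if PySem.Str.len rhs = 2 then
            cand2 (P rd cs (k - i) i (sOf (rhs.toList.getD 0 ' ')))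
                  (P rd cs (j - k) k (sOf (rhs.toList.getD 1 ' ')))
          else []) ++ candR rd cs i j k rhss := by
      simp [candR]
    by_cases h2 : PySem.Str.len rhs = 2
    · have hcl : (tget t i k).contains (sOf (rhs.toList.getD 0 ' '))
          = (P rd cs (k - i) i (sOf (rhs.toList.getD 0 ' '))).isSome := by
        rw [PySem.Dict.contains_eq_isSome_get?, hL]
      have hcr : (tget t k j).contains (sOf (rhs.toList.getD 1 ' '))
          = (P rd cs (j - k) k (sOf (rhs.toList.getD 1 ' '))).isSome := by
        rw [PySem.Dict.contains_eq_isSome_get?, hR]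
      rcases hPL : P rd cs (k - i) i (sOf (rhs.toList.getD 0 ' ')) with _ | lv
        <;> rcases hPR : P rd cs (j - k) k (sOf (rhs.toList.getD 1 ' ')) with _ | rv
      · have hstep : cstep t i j k lhs d rhs = d := by
          unfold cstep; rw [if_pos h2]; simp only []
          rw [if_neg (by rw [hcl, hPL]; simp)]
        rw [hstep, ihr d, hflat, hPL, hPR, if_pos h2]
        rfl
      · have hstep : cstep t i j k lhs d rhs = d := by
          unfold cstep; rw [if_pos h2]; simp only []
          rw [if_neg (by rw [hcl, hPL]; simp)]
        rw [hstep, ihr d, hflat, hPL, hPR, if_pos h2]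
        rfl
      · have hstep : cstep t i j k lhs d rhs = d := by
          unfold cstep; rw [if_pos h2]; simp only []
          rw [if_neg (by rw [hcl, hcr, hPL, hPR]; simp)]
        rw [hstep, ihr d, hflat, hPL, hPR, if_pos h2]
        rfl
      · -- both defined: a real min-update at key lhs
        have hgl : (tget t i k).getD (sOf (rhs.toList.getD 0 ' ')) 0 = lv := by
          rw [PySem.Dict.getD_eq_get?_getD, hL, hPL]; rfl
        have hgr : (tget t k j).getD (sOf (rhs.toList.getD 1 ' ')) 0 = rv := by
          rw [PySem.Dict.getD_eq_get?_getD, hR, hPR]; rfl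
        have hstep : cstep t i j k lhs d rhs
            = d.insert lhs (match d.get? lhs with
                | none => max lv rv + 1
                | some m => min m (max lv rv + 1)) := by
          unfold cstep; rw [if_pos h2]; simp only []
          rw [if_pos (by rw [hcl, hcr, hPL, hPR]; rfl)]
          rw [hgl, hgr]
          cases hc : d.contains lhs
          · rw [if_neg (by simp)]
            have hnone : d.get? lhs = none :=
              (PySem.Dict.get?_eq_none_iff_contains d lhs).mpr hc
            rw [hnone]
          · rw [if_pos (by simp)]
            have := PySem.Dict.contains_eq_isSome_get? (d := d) (k := lhs)
            rw [hc] at this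
            rcases hm : d.get? lhs with _ | m
            · rw [hm] at this; simp at this
            · rw [PySem.Dict.getD_eq_get?_getD, hm]
              rfl
        rw [hstep, ihr _, hflat, hPL, hPR]
        by_cases hv : v = lhs
        · subst hv
          rw [if_pos rfl, if_pos rfl]
          rw [PySem.Dict.get?_insert_self]
          have hc2 : (cand2 (some lv) (some rv)) = [max lv rv + 1] := rfl
          rw [hc2, if_pos h2]
          have hmf : mfold (d.get? v) ([max lv rv + 1] ++ candR rd cs i j k rhss)
              = mfold (mstep (d.get? v) (max lv rv + 1)) (candR rd cs i j k rhss) := by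
            rw [mfold_append]; rfl
          rw [hmf]
          rfl
        · rw [if_neg hv, if_neg hv]
          rw [PySem.Dict.get?_insert_of_ne _ _ hv]
    · have hstep : cstep t i j k lhs d rhs = d := by
        unfold cstep; rw [if_neg h2]
      rw [hstep, ihr d, hflat, if_neg h2]
      rfl

theorem keys_fold_get? (rd : PySem.Dict String (List String)) (cs : List Char)
    (t : List (List (PySem.Dict String Int))) (i j k : Nat) (v : String)
    (hL : ∀ X, (tget t i k).get? X = P rd cs (k - i) i X)
    (hR : ∀ Y, (tget t k j).get? Y = P rd cs (j - k) k Y) :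
    ∀ (ks : List String) (d : PySem.Dict String Int),
    ((ks.foldl (fun d lhs => (rd.getD lhs []).foldl (cstep t i j k lhs) d) d).get? v)
      = mfold (d.get? v) (ks.flatMap fun lhs =>
          if lhs = v then candR rd cs i j k (rd.getD v []) else []) := by
  intro ks
  induction ks with
  | nil => intro d; rfl
  | cons lhs ks ihk =>
    intro d
    rw [List.foldl_cons, ihk _, List.flatMap_cons, mfold_append]
    congr 1
    rw [cstep_fold_get? rd cs t i j k lhs v hL hR]
    by_cases hv : v = lhs
    · subst hv
      rw [if_pos rfl, if_pos rfl]
    · rw [if_neg hv, if_neg (fun hh => hv hh.symm)]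
      rfl

theorem kfold_get? (rd : PySem.Dict String (List String)) (cs : List Char)
    (t : List (List (PySem.Dict String Int))) (i j : Nat) (v : String)
    (hsub : ∀ k, i < k → k < j →
      (∀ X, (tget t i k).get? X = P rd cs (k - i) i X) ∧
      (∀ Y, (tget t k j).get? Y = P rd cs (j - k) k Y)) :
    ∀ (kl : List Nat), (∀ k ∈ kl, i < k ∧ k < j) → ∀ (d : PySem.Dict String Int),
    ((kl.foldl (fun d k => rd.keys.foldl (fun d lhs =>
        (rd.getD lhs []).foldl (cstep t i j k lhs) d) d) d).get? v)
      = mfold (d.get? v) (kl.flatMap fun k => rd.keys.flatMap fun lhs =>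
          if lhs = v then candR rd cs i j k (rd.getD v []) else []) := by
  intro kl
  induction kl with
  | nil => intro _ d; rfl
  | cons k kl ihl =>
    intro hb d
    have hk := hb k (by simp)
    rw [List.foldl_cons, ihl (fun k' hk' => hb k' (by simp [hk'])) _,
      List.flatMap_cons, mfold_append]
    congr 1
    exact keys_fold_get? rd cs t i j k v (hsub k hk.1 hk.2).1 (hsub k hk.1 hk.2).2 rd.keys d

theorem keys_flat_if (v : String) (C : List Int) :
    ∀ (ks : List String), ks.Nodup →
    (ks.flatMap fun lhs => if lhs = v then C else []) = if v ∈ ks then C else [] := by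
  intro ks
  induction ks with
  | nil => intro _; simp
  | cons lhs ks ihk =>
    intro hnd
    rw [List.flatMap_cons, ihk hnd.of_cons]
    by_cases hv : lhs = v
    · subst hv
      have hnm : lhs ∉ ks := (List.nodup_cons.mp hnd).1
      rw [if_pos rfl, if_neg hnm, if_pos (by simp)]
      simp
    · rw [if_neg hv, List.nil_append]
      by_cases hm : v ∈ ks
      · rw [if_pos hm, if_pos (List.mem_cons_of_mem lhs hm)]
      · rw [if_neg hm, if_neg (by
          intro h
          rcases List.mem_cons.mp h with h | h
          · exact hv h.symm
          · exact hm h)]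

theorem cellVal_get? (rd : PySem.Dict String (List String)) (cs : List Char)
    (t : List (List (PySem.Dict String Int))) (i j : Nat)
    (hij : i < j) (hL2 : j - i ≠ 1)
    (hempty : tget t i j = PySem.Dict.empty)
    (hnd : rd.keys.Nodup)
    (hsub : ∀ k, i < k → k < j →
      (∀ X, (tget t i k).get? X = P rd cs (k - i) i X) ∧
      (∀ Y, (tget t k j).get? Y = P rd cs (j - k) k Y)) :
    ∀ v, (cellVal t i j rd).get? v = P rd cs (j - i) i v := by
  intro v
  unfold cellVal
  have hbnd : ∀ k ∈ rangeNat (i+1) j, i < k ∧ k < j := by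
    intro k hk
    unfold rangeNat at hk
    have := List.mem_range'_1.mp hk
    omega
  rw [kfold_get? rd cs t i j v hsub (rangeNat (i+1) j) hbnd (tget t i j), hempty,
    PySem.Dict.get?_empty]
  have hkeys : ∀ k : Nat,
      (rd.keys.flatMap fun lhs => if lhs = v then candR rd cs i j k (rd.getD v []) else [])
        = if v ∈ rd.keys then candR rd cs i j k (rd.getD v []) else [] :=
    fun k => keys_flat_if v _ rd.keys hnd
  by_cases hv : v ∈ rd.keys
  · simp only [hkeys, if_pos hv]
    rw [mfold_none_eq_min?]
    simp only [candR]
    have hperm := flatMap_flatMap_perm (rangeNat (i+1) j) (rd.getD v [])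
      (fun k rhs =>
        if PySem.Str.len rhs = 2 then
          cand2 (P rd cs (k - i) i (sOf (rhs.toList.getD 0 ' ')))
                (P rd cs (j - k) k (sOf (rhs.toList.getD 1 ' ')))
        else [])
    rw [min?_perm hperm]
    have hlist : ((rd.getD v []).flatMap fun rhs => (rangeNat (i+1) j).flatMap fun k =>
          if PySem.Str.len rhs = 2 then
            cand2 (P rd cs (k - i) i (sOf (rhs.toList.getD 0 ' ')))
                  (P rd cs (j - k) k (sOf (rhs.toList.getD 1 ' ')))
          else [])
        = candB rd (fun L' i' v' => P rd cs L' i' v') (j - i) i v := by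
      unfold candB
      refine List.flatMap_congr ?_
      intro rhs _
      by_cases h2 : PySem.Str.len rhs = 2
      · rw [if_pos h2]
        have hrange : i + (j - i) = j := by omega
        rw [hrange]
        refine List.flatMap_congr ?_
        intro k hk
        have hkb := hbnd k hk
        rw [if_pos h2]
        have : j - i - (k - i) = j - k := by omega
        rw [this]
      · rw [if_neg h2]
        have : ∀ k : Nat, (if PySem.Str.len rhs = 2 then
            cand2 (P rd cs (k - i) i (sOf (rhs.toList.getD 0 ' ')))
                  (P rd cs (j - k) k (sOf (rhs.toList.getD 1 ' ')))
          else ([] : List Int)) = [] := fun k => if_neg h2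
        simp only [this]
        simp
    rw [hlist, ← mfold_none_eq_min?, ← P_ne_one rd cs i v hL2]
  · simp only [hkeys, if_neg hv]
    have hflat : ((rangeNat (i+1) j).flatMap fun _ => ([] : List Int)) = [] := by simp
    rw [hflat]
    have hgd : rd.getD v [] = [] := by
      apply PySem.Dict.getD_of_not_contains
      rw [← Bool.not_eq_true]
      intro hc
      exact hv ((PySem.Dict.contains_iff_mem_keys rd v).mp hc)
    rw [P_ne_one rd cs i v hL2]
    unfold candB
    rw [hgd]
    rfl

theorem insert1_fold_get? (cond : String → Bool) :
    ∀ (ks : List String) (d : PySem.Dict String Int) (v : String),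
    ((ks.foldl (fun d lhs => if cond lhs then d.insert lhs 1 else d) d).get? v)
      = if cond v = true ∧ v ∈ ks then some (1 : Int) else d.get? v := by
  intro ks
  induction ks with
  | nil => intro d v; simp
  | cons lhs ks ihk =>
    intro d v
    rw [List.foldl_cons, ihk _]
    by_cases hm : cond v = true ∧ v ∈ ks
    · rw [if_pos hm, if_pos ⟨hm.1, by simp [hm.2]⟩]
    · rw [if_neg hm]
      by_cases hv : v = lhs
      · subst hv
        by_cases hcv : cond v = true
        · rw [if_pos hcv, if_pos ⟨hcv, by simp⟩, PySem.Dict.get?_insert_self]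
        · rw [if_neg hcv, if_neg (fun hh => hcv hh.1)]
      · have hnotm : ¬(cond v = true ∧ v ∈ lhs :: ks) := by
          intro hh
          rcases List.mem_cons.mp hh.2 with h | h
          · exact hv h
          · exact hm ⟨hh.1, h⟩
        rw [if_neg hnotm]
        by_cases hcl : cond lhs = true
        · rw [if_pos hcl, PySem.Dict.get?_insert_of_ne _ _ hv]
        · rw [if_neg hcl]

theorem fillLen1_spec (rd : PySem.Dict String (List String)) (cs : List Char) (n : Nat)
    (hn : n = cs.length) :
    Shape (fillLen1 (List.replicate n (List.replicate (n+1) PySem.Dict.empty)) rd cs) n ∧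
    (∀ i, i < n → ∀ v,
      (tget (fillLen1 (List.replicate n (List.replicate (n+1) PySem.Dict.empty)) rd cs)
        i (i+1)).get? v = P rd cs 1 i v) ∧
    (∀ i j, (n ≤ i ∨ j ≠ i + 1) →
      tget (fillLen1 (List.replicate n (List.replicate (n+1) PySem.Dict.empty)) rd cs) i j
        = PySem.Dict.empty) := by
  unfold fillLen1
  rw [← hn]
  have key := foldl_range'_inv
    (fun t i =>
      rd.keys.foldl (fun t lhs =>
        if (rd.getD lhs []).contains (sOf (cs.getD i ' ')) then
          tset t i (i+1) ((tget t i (i+1)).insert lhs 1)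
        else t) t)
    (fun m t => Shape t n ∧
      (∀ i, i < m → ∀ v, (tget t i (i+1)).get? v = P rd cs 1 i v) ∧
      (∀ i j, (m ≤ i ∨ j ≠ i + 1) → tget t i j = PySem.Dict.empty))
    0 n (List.replicate n (List.replicate (n+1) PySem.Dict.empty))
    ⟨shape_tbl0 n, fun i hi => absurd hi (by omega), fun i j _ => tget_tbl0 n i j⟩
    (by
      intro m u hm0 hmn hq
      obtain ⟨hsh, hgood, hemp⟩ := hq
      have hmn' : m < n := by omega
      have hstart : u = tset u m (m+1) (tget u m (m+1)) :=
        (tset_tget_self hsh hmn' (by omega)).symm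
      have key2 := foldl_tset u m (m+1)
        (fun t lhs =>
          if (rd.getD lhs []).contains (sOf (cs.getD m ' ')) then
            tset t m (m+1) ((tget t m (m+1)).insert lhs 1)
          else t)
        (fun d lhs =>
          if (rd.getD lhs []).contains (sOf (cs.getD m ' ')) then d.insert lhs 1 else d)
        rd.keys
        (by
          intro d lhs _
          simp only []
          by_cases hc : (rd.getD lhs []).contains (sOf (cs.getD m ' '))
          · rw [if_pos hc, if_pos hc, tget_tset_self hsh hmn' (by omega) d, tset_tset]
          · rw [if_neg hc, if_neg hc])
        (tget u m (m+1))
      rw [← hstart] at key2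
      simp only []
      rw [key2]
      have hcell : tget u m (m+1) = PySem.Dict.empty := hemp m (m+1) (Or.inl le_rfl)
      refine ⟨shape_tset hsh _ _ _, ?_, ?_⟩
      · intro i hi v
        by_cases him : i = m
        · subst him
          rw [tget_tset_self hsh hmn' (by omega)]
          rw [insert1_fold_get? _ rd.keys _ v, hcell, PySem.Dict.get?_empty, P_one]
          by_cases hvk : v ∈ rd.keys
          · by_cases hcv : (rd.getD v []).contains (sOf (cs.getD i ' ')) = true
            · rw [if_pos ⟨hcv, hvk⟩, if_pos hcv]
            · rw [if_neg (fun hh => hcv hh.1), if_neg hcv]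
          · have hgd : rd.getD v [] = [] := by
              apply PySem.Dict.getD_of_not_contains
              rw [← Bool.not_eq_true]
              intro hc
              exact hvk ((PySem.Dict.contains_iff_mem_keys rd v).mp hc)
            rw [if_neg (fun hh => hvk hh.2), if_neg (by rw [hgd]; simp)]
        · rw [tget_tset_ne (Or.inl him) _]
          exact hgood i (by omega) v
      · intro i j hij
        have hne : i ≠ m ∨ j ≠ m + 1 := by
          by_cases him : i = m
          · subst him
            rcases hij with h | h
            · omega
            · exact Or.inr (fun hh => h (by omega))
          · exact Or.inl him
        rw [tget_tset_ne hne _]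
        apply hemp
        rcases hij with h | h
        · exact Or.inl (by omega)
        · exact Or.inr h)
  rw [Nat.zero_add] at key
  unfold rangeNat
  rw [Nat.sub_zero]
  exact key

def Good (rd : PySem.Dict String (List String)) (cs : List Char) (n Λ i0 : Nat)
    (t : List (List (PySem.Dict String Int))) : Prop :=
  Shape t n ∧
  (∀ i j, i < j → j ≤ n → (j - i < Λ ∨ (j - i = Λ ∧ i < i0)) →
    ∀ v, (tget t i j).get? v = P rd cs (j - i) i v) ∧
  (∀ i j, i < j → j ≤ n → (Λ < j - i ∨ (j - i = Λ ∧ i0 ≤ i)) → tget t i j = PySem.Dict.empty)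

theorem inner_step (rd : PySem.Dict String (List String)) (cs : List Char)
    {n Λ i0 : Nat} {t : List (List (PySem.Dict String Int))}
    (hnd : rd.keys.Nodup) (hΛ2 : 2 ≤ Λ) (hΛn : Λ ≤ n) (hi0 : i0 ≤ n - Λ)
    (hq : Good rd cs n Λ i0 t) :
    Good rd cs n Λ (i0 + 1) (fillCell t i0 (i0 + Λ) rd) := by
  obtain ⟨hsh, hgood, hemp⟩ := hq
  have hi0n : i0 < n := by omega
  have hjn : i0 + Λ ≤ n := by omega
  rw [fillCell_eq hsh rd hi0n hjn]
  have hcv : ∀ v, (cellVal t i0 (i0 + Λ) rd).get? v = P rd cs (i0 + Λ - i0) i0 v := by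
    apply cellVal_get? rd cs t i0 (i0 + Λ) (by omega) (by omega)
    · exact hemp i0 (i0 + Λ) (by omega) hjn (Or.inr ⟨by omega, le_rfl⟩)
    · exact hnd
    · intro k hk1 hk2
      constructor
      · exact fun X => hgood i0 k hk1 (by omega) (Or.inl (by omega)) X
      · exact fun Y => hgood k (i0 + Λ) hk2 hjn (Or.inl (by omega)) Y
  refine ⟨shape_tset hsh _ _ _, ?_, ?_⟩
  · intro i j hij hjle hcond v
    by_cases hcell : i = i0 ∧ j = i0 + Λ
    · obtain ⟨h1, h2⟩ := hcell
      subst h1; subst h2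
      rw [tget_tset_self hsh hi0n (by omega)]
      exact hcv v
    · have hne : i ≠ i0 ∨ j ≠ i0 + Λ := by tauto
      rw [tget_tset_ne hne _]
      apply hgood i j hij hjle
      rcases hcond with h | ⟨h1, h2⟩
      · exact Or.inl h
      · refine Or.inr ⟨h1, ?_⟩
        have : ¬(i = i0 ∧ j = i0 + Λ) := hcell
        by_cases hii : i = i0
        · exfalso; apply this; exact ⟨hii, by omega⟩
        · omega
  · intro i j hij hjle hcond
    have hne : i ≠ i0 ∨ j ≠ i0 + Λ := by
      rcases hcond with h | ⟨h1, h2⟩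
      · by_cases hii : i = i0
        · subst hii; right; omega
        · exact Or.inl hii
      · left; omega
    rw [tget_tset_ne hne _]
    apply hemp i j hij hjle
    rcases hcond with h | ⟨h1, h2⟩
    · exact Or.inl h
    · exact Or.inr ⟨h1, by omega⟩

theorem good_advance (rd : PySem.Dict String (List String)) (cs : List Char)
    {n Λ : Nat} {t : List (List (PySem.Dict String Int))}
    (hq : Good rd cs n Λ (n - Λ + 1) t) : Good rd cs n (Λ + 1) 0 t := by
  obtain ⟨hsh, hgood, hemp⟩ := hq
  refine ⟨hsh, ?_, ?_⟩
  · intro i j hij hjle hcond v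
    apply hgood i j hij hjle
    rcases hcond with h | ⟨h1, h2⟩
    · by_cases hlt : j - i < Λ
      · exact Or.inl hlt
      · exact Or.inr ⟨by omega, by omega⟩
    · omega
  · intro i j hij hjle hcond
    apply hemp i j hij hjle
    rcases hcond with h | ⟨h1, h2⟩
    · exact Or.inl (by omega)
    · exact Or.inl (by omega)

theorem A_eq (st : String) (rule_dict : List (String × List String)) (start_var : String)
    (hne : st.toList ≠ []) :
    CYK_d st rule_dict start_var =
      (match P (PySem.Dict.ofList rule_dict) st.toList st.toList.length 0 start_var with
       | some d => d
       | none => -1) := by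
  have hn1 : 1 ≤ st.toList.length := by
    cases hcs : st.toList with
    | nil => exact absurd hcs hne
    | cons c l => simp
  have hnd : (PySem.Dict.ofList rule_dict).keys.Nodup :=
    PySem.Dict.nodup_keys_ofList rule_dict
  have hinit := fillLen1_spec (PySem.Dict.ofList rule_dict) st.toList st.toList.length rfl
  have h0 : Good (PySem.Dict.ofList rule_dict) st.toList st.toList.length 2 0
      (fillLen1 (List.replicate st.toList.length
        (List.replicate (st.toList.length + 1) PySem.Dict.empty))
        (PySem.Dict.ofList rule_dict) st.toList) := by
    obtain ⟨hsh, hgood, hemp⟩ := hinit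
    refine ⟨hsh, ?_, ?_⟩
    · intro i j hij hjle hcond v
      have hspan : j = i + 1 := by omega
      subst hspan
      have : i + 1 - i = 1 := by omega
      rw [this]
      exact hgood i (by omega) v
    · intro i j hij hjle hcond
      apply hemp
      right
      omega
  have key := foldl_range'_inv
    (fun t length =>
      (rangeNat 0 (st.toList.length - length + 1)).foldl
        (fun t i => fillCell t i (i + length) (PySem.Dict.ofList rule_dict)) t)
    (fun Λ t => 2 ≤ Λ → Good (PySem.Dict.ofList rule_dict) st.toList st.toList.length Λ 0 t)
    2 (st.toList.length - 1) _ (fun _ => h0)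
    (by
      intro Λ u hΛ2 hΛlt hq _
      have hqΛ := hq hΛ2
      have hΛn : Λ ≤ st.toList.length := by omega
      simp only []
      have key2 := foldl_range'_inv
        (fun t i => fillCell t i (i + Λ) (PySem.Dict.ofList rule_dict))
        (fun i0 t => Good (PySem.Dict.ofList rule_dict) st.toList st.toList.length Λ i0 t)
        0 (st.toList.length - Λ + 1) u hqΛ
        (by
          intro m w hm0 hmlt hw
          exact inner_step _ _ hnd hΛ2 hΛn (by omega) hw)
      rw [Nat.zero_add] at key2
      unfold rangeNat
      rw [Nat.sub_zero]
      exact good_advance _ _ key2)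
  have h2n : 2 + (st.toList.length - 1) = st.toList.length + 1 := by omega
  rw [h2n] at key
  have hfin := key (by omega)
  show (match (tget ((rangeNat 2 (st.toList.length + 1)).foldl
      (fun t length => (rangeNat 0 (st.toList.length - length + 1)).foldl
        (fun t i => fillCell t i (i + length) (PySem.Dict.ofList rule_dict)) t)
      (fillLen1 (List.replicate st.toList.length
        (List.replicate (st.toList.length + 1) PySem.Dict.empty))
        (PySem.Dict.ofList rule_dict) st.toList)) 0 st.toList.length).get? start_var with
    | some d => d
    | none => -1)
    = (match P (PySem.Dict.ofList rule_dict) st.toList st.toList.length 0 start_var with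
       | some d => d
       | none => -1)
  have hcell := hfin.2.1 0 st.toList.length (by omega) le_rfl (Or.inl (by omega)) start_var
  rw [Nat.sub_zero] at hcell
  have hr : rangeNat 2 (st.toList.length + 1) = List.range' 2 (st.toList.length - 1) := by
    have harith : st.toList.length + 1 - 2 = st.toList.length - 1 := by omega
    unfold rangeNat
    rw [harith]
  rw [hr, hcell]

-- ===== VERDICT (by name: the statement is the Claim_ definition above) =====
theorem CYK_d_spec : Claim_equal_CYK_d := by
  intro st rule_dict start_var _ hpre
  unfold Spec_CYK_d
  have hne : st.toList ≠ [] := by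
    intro h
    exact hpre (String.toList_eq_nil_iff.mp h)
  rw [A_eq st rule_dict start_var hne, alt_eq]
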